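-- pv_equiv track=rewrite | github.com/heartnetkung/symbolic_fsl | arc/graphic/grid_methods.py | _stats_mode
-- ===== SOURCE A (Python) =====
-- from typing import Type, Optional, Any
--
-- def _stats_mode(arr: list[Any])->Any:
--     if len(arr) == 0:
--         return None
--     counts = {}
--     for el in arr:
--         if el not in counts:
--             counts[el] = 0
--         counts[el] += 1
--     return sorted(counts.items(), key=lambda x: -x[1])[0][0]
-- ===== SOURCE B (Python) =====
-- from typing import Type, Optional, Any
--
--
-- def _stats_mode(arr: list[Any]) -> Any:
--     if len(arr) == 0:
--         return None
--     counts = {}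
--     for el in arr:
--         counts[el] = counts.get(el, 0) + 1
--     max_count = max(counts.values())
--     for el in arr:
--         if counts[el] == max_count:
--             return el
-- ===== Notes on version B (the rewrite author's own statement) =====
-- stated objective: alternative
-- what changed: Replaces A's stable sort of the distinct-element counts (taking the first key) by a max over the count values followed by a second linear pass over the original list returning the first element attaining that maximal count.
import Mathlib
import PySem

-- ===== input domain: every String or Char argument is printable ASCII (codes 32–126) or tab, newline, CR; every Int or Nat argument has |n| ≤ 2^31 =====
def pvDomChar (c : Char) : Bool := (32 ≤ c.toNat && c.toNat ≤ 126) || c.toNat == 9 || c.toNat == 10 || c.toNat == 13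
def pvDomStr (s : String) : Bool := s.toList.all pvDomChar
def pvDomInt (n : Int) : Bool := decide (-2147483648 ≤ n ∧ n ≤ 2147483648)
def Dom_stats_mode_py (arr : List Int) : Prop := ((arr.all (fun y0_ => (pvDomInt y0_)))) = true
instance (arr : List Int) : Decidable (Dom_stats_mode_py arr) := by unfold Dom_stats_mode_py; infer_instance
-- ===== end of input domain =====

-- B replaces A's stable sort over the distinct counts by a max over the count values
-- plus a second pass over the original list (alternative decomposition, same result).

-- ===== PORT A =====
def stats_mode_py (arr : List Int) : Option Int :=
  if arr.length = 0 then none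
  else
    let counts := arr.foldl (fun counts el =>
      let counts := if counts.contains el then counts else counts.insert el 0
      counts.modify el 0 (· + 1)) (PySem.Dict.empty : PySem.Dict Int Int)
    (PySem.List.pyGet? (PySem.List.sorted counts.items (fun x => -x.2)) 0).map (·.1)

-- ===== PORT B =====
def stats_mode_py_alt (arr : List Int) : Option Int :=
  if arr.length = 0 then none
  else
    let counts := arr.foldl (fun counts el => counts.insert el (counts.getD el 0 + 1)) (PySem.Dict.empty : PySem.Dict Int Int)
    match PySem.List.max? counts.values (fun v => v) with
    | none => none
    | some m => arr.find? (fun el => counts.getD el 0 == m)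

-- ===== PRECONDITION & SPEC =====
def Spec_stats_mode_py (arr : List Int) (out : Option Int) : Prop := out = stats_mode_py_alt arr
instance (arr : List Int) (out : Option Int) : Decidable (Spec_stats_mode_py arr out) := by unfold Spec_stats_mode_py; infer_instance

-- ===== CLAIM (what is proved, stated in full; the proofs are below) =====
def Claim_equal_stats_mode_py : Prop := ∀ (arr : List Int), Dom_stats_mode_py arr → Spec_stats_mode_py arr (stats_mode_py arr)

-- ===== LEMMAS AND PROOFS =====

-- A's counting loop builds exactly collections.Counter(arr)
theorem pv_step_eq (d : PySem.Dict Int Int) (el : Int) :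
    (if d.contains el then d else d.insert el 0).modify el 0 (· + 1) = d.modify el 0 (· + 1) := by
  by_cases h : d.contains el = true
  · simp [h]
  · have h' : d.contains el = false := by simpa using h
    simp only [h', Bool.false_eq_true, if_false, PySem.Dict.modify,
      PySem.Dict.getD_insert_self, PySem.Dict.insert_insert_self,
      PySem.Dict.getD_of_not_contains _ _ h']

theorem pv_countsA_eq (arr : List Int) :
    arr.foldl (fun counts el =>
      (if counts.contains el then counts else counts.insert el 0).modify el 0 (· + 1))
      PySem.Dict.empty = PySem.Dict.counter arr := by
  rw [PySem.Dict.counter]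
  congr 1
  funext d el
  exact pv_step_eq d el

-- the fold steps of min? / max?
def pvMinStep {α : Type} (key : α → Int) (acc : Option α) (x : α) : Option α :=
  match acc with
  | none => some x
  | some m => if key x < key m then some x else some m

def pvMaxStep {α : Type} (key : α → Int) (acc : Option α) (x : α) : Option α :=
  match acc with
  | none => some x
  | some m => if key m < key x then some x else some m

theorem pv_min?_eq_foldl {α : Type} (xs : List α) (key : α → Int) :
    PySem.List.min? xs key = xs.foldl (pvMinStep key) none := rfl

theorem pv_max?_eq_foldl {α : Type} (xs : List α) (key : α → Int) :
    PySem.List.max? xs key = xs.foldl (pvMaxStep key) none := rfl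

-- head of a stable sort = first element with minimal key
theorem pv_head_sorted {α : Type} (xs : List α) (key : α → Int) :
    (PySem.List.sorted xs key).head? = PySem.List.min? xs key := by
  induction xs using List.reverseRecOn with
  | nil => rfl
  | append_singleton l x ih =>
    rw [PySem.List.sorted_eq_foldl_insertBy] at ih ⊢
    rw [pv_min?_eq_foldl] at ih ⊢
    rw [List.foldl_append, List.foldl_append]
    simp only [List.foldl_cons, List.foldl_nil]
    cases hl : (l.foldl (fun acc x =>
        PySem.List.insertBy (fun a b => decide (key a < key b)) x acc) []) with
    | nil =>
      rw [hl] at ih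
      simp only [List.head?_nil] at ih
      rw [← ih]
      rfl
    | cons y ys =>
      rw [hl] at ih
      simp only [List.head?_cons] at ih
      rw [← ih]
      by_cases h : key x < key y
      · simp [PySem.List.insertBy, h, pvMinStep]
      · simp [PySem.List.insertBy, h, pvMinStep]

-- min?/max? over a mapped list
theorem pv_foldl_minStep_map {α β : Type} (key : β → Int) (f : α → β) (l : List α) :
    ∀ acc : Option α,
      l.foldl (fun a x => pvMinStep key a (f x)) (acc.map f)
        = (l.foldl (pvMinStep (fun a => key (f a))) acc).map f := by
  induction l with
  | nil => intro acc; rfl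
  | cons x t ih =>
    intro acc
    have hstep : pvMinStep key (acc.map f) (f x)
        = (pvMinStep (fun a => key (f a)) acc x).map f := by
      cases acc with
      | none => rfl
      | some m =>
        by_cases h : key (f x) < key (f m) <;> simp [pvMinStep, h]
    simp only [List.foldl_cons, hstep, ih]

theorem pv_min?_map {α β : Type} (key : β → Int) (f : α → β) (l : List α) :
    PySem.List.min? (l.map f) key = (PySem.List.min? l (fun a => key (f a))).map f := by
  rw [pv_min?_eq_foldl, pv_min?_eq_foldl, List.foldl_map]
  have := pv_foldl_minStep_map key f l none
  simpa using this

theorem pv_foldl_maxStep_map {α β : Type} (key : β → Int) (f : α → β) (l : List α) :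
    ∀ acc : Option α,
      l.foldl (fun a x => pvMaxStep key a (f x)) (acc.map f)
        = (l.foldl (pvMaxStep (fun a => key (f a))) acc).map f := by
  induction l with
  | nil => intro acc; rfl
  | cons x t ih =>
    intro acc
    have hstep : pvMaxStep key (acc.map f) (f x)
        = (pvMaxStep (fun a => key (f a)) acc x).map f := by
      cases acc with
      | none => rfl
      | some m =>
        by_cases h : key (f m) < key (f x) <;> simp [pvMaxStep, h]
    simp only [List.foldl_cons, hstep, ih]

theorem pv_max?_map {α β : Type} (key : β → Int) (f : α → β) (l : List α) :
    PySem.List.max? (l.map f) key = (PySem.List.max? l (fun a => key (f a))).map f := by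
  rw [pv_max?_eq_foldl, pv_max?_eq_foldl, List.foldl_map]
  have := pv_foldl_maxStep_map key f l none
  simpa using this

-- min by negated key = max by the key (same first-extremal tie-breaking)
theorem pv_min?_neg {α : Type} (c : α → Int) (l : List α) :
    PySem.List.min? l (fun a => -(c a)) = PySem.List.max? l c := by
  rw [pv_min?_eq_foldl, pv_max?_eq_foldl]
  have : ∀ acc : Option α,
      l.foldl (pvMinStep (fun a => -(c a))) acc = l.foldl (pvMaxStep c) acc := by
    induction l with
    | nil => intro acc; rfl
    | cons x t ih =>
      intro acc
      have hstep : pvMinStep (fun a => -(c a)) acc x = pvMaxStep c acc x := by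
        cases acc with
        | none => rfl
        | some m =>
          have : (-(c x) < -(c m)) ↔ (c m < c x) := by omega
          simp [pvMinStep, pvMaxStep, this]
      simp only [List.foldl_cons, hstep, ih]
  exact this none

-- max? returns the FIRST element attaining the maximal key
theorem pv_max?_aux {α : Type} (c : α → Int) :
    ∀ (l : List α) (a m : α), l.foldl (pvMaxStep c) (some a) = some m →
      (m = a ∧ ∀ y ∈ l, c y ≤ c a) ∨
      (m ∈ l ∧ c a < c m ∧ l.find? (fun x => c x == c m) = some m) := by
  intro l
  induction l with
  | nil =>
    intro a m h
    simp only [List.foldl_nil, Option.some.injEq] at h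
    exact Or.inl ⟨h.symm, by simp⟩
  | cons x t ih =>
    intro a m h
    simp only [List.foldl_cons] at h
    by_cases hx : c a < c x
    · have h' : t.foldl (pvMaxStep c) (some x) = some m := by
        simpa [pvMaxStep, hx] using h
      rcases ih x m h' with ⟨rfl, hall⟩ | ⟨hmem, hlt, hfind⟩
      · refine Or.inr ⟨List.mem_cons_self, hx, ?_⟩
        simp
      · refine Or.inr ⟨List.mem_cons_of_mem _ hmem, lt_trans hx hlt, ?_⟩
        have hne : (c x == c m) = false := by
          simp only [beq_eq_false_iff_ne, ne_eq]
          omega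
        simp [hne, hfind]
    · have h' : t.foldl (pvMaxStep c) (some a) = some m := by
        simpa [pvMaxStep, hx] using h
      rcases ih a m h' with ⟨rfl, hall⟩ | ⟨hmem, hlt, hfind⟩
      · refine Or.inl ⟨rfl, ?_⟩
        intro y hy
        rcases List.mem_cons.mp hy with rfl | hy
        · omega
        · exact hall y hy
      · refine Or.inr ⟨List.mem_cons_of_mem _ hmem, hlt, ?_⟩
        have hne : (c x == c m) = false := by
          simp only [beq_eq_false_iff_ne, ne_eq]
          omega
        simp [hne, hfind]

theorem pv_max?_find? {α : Type} (c : α → Int) (l : List α) (m : α)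
    (h : PySem.List.max? l c = some m) :
    l.find? (fun x => c x == c m) = some m := by
  cases l with
  | nil => simp [pv_max?_eq_foldl] at h
  | cons x t =>
    rw [pv_max?_eq_foldl] at h
    simp only [List.foldl_cons] at h
    have h' : t.foldl (pvMaxStep c) (some x) = some m := h
    rcases pv_max?_aux c t x m h' with ⟨rfl, _⟩ | ⟨_, hlt, hfind⟩
    · simp
    · have hne : (c x == c m) = false := by
        simp only [beq_eq_false_iff_ne, ne_eq]
        omega
      simp [hne, hfind]

-- the first match in a list is the first match in its ordered dedup
theorem pv_find?_foldl_add (p : Int → Bool) :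
    ∀ (l : List Int) (s : List Int),
      List.find? p (l.foldl PySem.Set.add s)
        = (List.find? p s).or (l.find? (fun x => p x && !(decide (x ∈ s)))) := by
  intro l
  induction l with
  | nil => intro s; simp
  | cons x t ih =>
    intro s
    simp only [List.foldl_cons]
    by_cases hx : x ∈ s
    · have hadd : PySem.Set.add s x = s := PySem.Set.add_of_mem hx
      rw [hadd, ih s]
      have hpx : (p x && !(decide (x ∈ s))) = false := by simp [hx]
      rw [List.find?_cons, hpx]
    · have hadd : PySem.Set.add s x = s ++ [x] := PySem.Set.add_of_not_mem hx
      rw [hadd, ih (s ++ [x])]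
      rw [List.find?_append]
      by_cases hpx : p x = true
      · have h1 : List.find? p [x] = some x := by simp [hpx]
        have h2 : ((x :: t).find? fun y => p y && !(decide (y ∈ s))) = some x := by
          rw [List.find?_cons]
          simp [hpx, hx]
        rw [h1, h2, Option.or_assoc]
        congr 1
      · have hpx' : p x = false := by simpa using hpx
        have h1 : List.find? p [x] = none := by simp [hpx']
        have hpred : (fun y => p y && !(decide (y ∈ s ++ [x])))
            = (fun y => p y && !(decide (y ∈ s))) := by
          funext y
          by_cases hyx : y = x
          · subst hyx; simp [hpx']
          · simp [List.mem_append, hyx]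
        rw [h1, Option.or_none, hpred]
        have h2 : ((x :: t).find? fun y => p y && !(decide (y ∈ s)))
            = (t.find? fun y => p y && !(decide (y ∈ s))) := by
          rw [List.find?_cons]
          simp [hpx']
        rw [h2]

theorem pv_find?_ofList (p : Int → Bool) (l : List Int) :
    List.find? p (PySem.Set.ofList l) = List.find? p l := by
  rw [PySem.Set.ofList, pv_find?_foldl_add]
  rw [PySem.Set.empty_eq]
  have : (fun x => p x && !(decide (x ∈ ([] : List Int)))) = p := by
    funext x
    simp
  rw [this]
  simp

-- ===== VERDICT (by name: the statement is the Claim_ definition above) =====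
theorem stats_mode_py_spec : Claim_equal_stats_mode_py := by
  intro arr _
  unfold Spec_stats_mode_py stats_mode_py stats_mode_py_alt
  by_cases h : arr.length = 0
  · simp [h]
  · simp only [if_neg h]
    have harr : arr ≠ [] := by
      intro hnil; exact h (by simp [hnil])
    -- both count dicts are Counter(arr)
    rw [pv_countsA_eq, PySem.Dict.foldl_insert_getD_add_one_eq_counter]
    set S : List Int := PySem.Set.ofList arr with hS
    set c : Int → Int := fun k => ((List.count k arr : Int)) with hc
    have hitems : (PySem.Dict.counter arr).items = S.map (fun k => (k, c k)) := by
      rw [PySem.Dict.items_counter]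
    have hvalues : (PySem.Dict.counter arr).values = S.map c := by
      rw [PySem.Dict.values, hitems, List.map_map]
      rfl
    -- S is nonempty
    have hSne : S ≠ [] := by
      rcases List.exists_mem_of_ne_nil arr harr with ⟨a, ha⟩
      have : a ∈ S := by
        rw [hS]
        exact (PySem.Set.mem_ofList arr a).mpr ha
      exact List.ne_nil_of_mem this
    -- the maximal element of S by count
    obtain ⟨m, hm⟩ : ∃ m, PySem.List.max? S c = some m := by
      cases hmx : PySem.List.max? S c with
      | none => exact absurd (Iff.mp (PySem.List.max?_eq_none_iff S c) hmx) hSne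
      | some m => exact ⟨m, rfl⟩
    -- A-side: head of the sort is (m, c m)
    have hAmin : (PySem.List.sorted ((PySem.Dict.counter arr).items) (fun x => -x.2)).head?
        = some (m, c m) := by
      rw [pv_head_sorted, hitems, pv_min?_map]
      have : (fun a => -((fun k => (k, c k)) a).2) = (fun a => -(c a)) := rfl
      rw [this, pv_min?_neg, hm]
      rfl
    obtain ⟨rest, hsort⟩ : ∃ rest,
        PySem.List.sorted ((PySem.Dict.counter arr).items) (fun x => -x.2)
          = (m, c m) :: rest := by
      cases hsrt : PySem.List.sorted ((PySem.Dict.counter arr).items) (fun x => -x.2) with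
      | nil => rw [hsrt] at hAmin; simp at hAmin
      | cons y ys =>
        rw [hsrt] at hAmin
        simp only [List.head?_cons, Option.some.injEq] at hAmin
        exact ⟨ys, by rw [hAmin]⟩
    rw [hsort]
    have hget : PySem.List.pyGet? ((m, c m) :: rest) 0 = some (m, c m) := by
      simp [PySem.List.pyGet?, PySem.List.pyIdx?]
    rw [hget]
    -- B-side
    have hmax : PySem.List.max? ((PySem.Dict.counter arr).values) (fun v => v) = some (c m) := by
      rw [hvalues, pv_max?_map]
      have : (fun a => ((fun v : Int => v) (c a))) = c := rfl
      rw [this, hm]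
      rfl
    rw [hmax]
    have hfind : arr.find? (fun el => (PySem.Dict.counter arr).getD el 0 == c m) = some m := by
      have hpred : (fun el => (PySem.Dict.counter arr).getD el 0 == c m)
          = (fun el => c el == c m) := by
        funext el
        rw [PySem.Dict.getD_counter]
      rw [hpred, ← pv_find?_ofList, ← hS]
      exact pv_max?_find? c S m hm
    simpa using hfind.symm
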